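-- pv_equiv track=rewrite | github.com/jungin-kim/OpenPatch | apps/local-worker/src/repooperator_worker/services/agent_orchestration_graph.py | _suggest_tests_for_changed_files
-- ===== SOURCE A (Python) =====
-- def _suggest_tests_for_changed_files(files: list[str]) -> list[str]:
--     if any(file.endswith(".py") for file in files):
--         return ["python -m pytest"]
--     if any(file.endswith((".ts", ".tsx", ".js", ".jsx")) for file in files):
--         return ["npm test"]
--     if any("dockerfile" in file.lower() or file.endswith((".yml", ".yaml")) for file in files):
--         return ["git diff --stat"]
--     return ["git diff --stat"]
-- ===== SOURCE B (Python) =====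
-- def _suggest_tests_for_changed_files(files: list[str]) -> list[str]:
--     has_py = False
--     has_js = False
--     for f in files:
--         if f.endswith(".py"):
--             has_py = True
--         elif f.endswith((".ts", ".tsx", ".js", ".jsx")):
--             has_js = True
--     if has_py:
--         return ["python -m pytest"]
--     if has_js:
--         return ["npm test"]
--     return ["git diff --stat"]
-- ===== Notes on version B (the rewrite author's own statement) =====
-- stated objective: simpler
-- what changed: One pass over files accumulating has_py/has_js flags replaces three separate short-circuiting any-scans, and the inert docker/yaml branch (which returns the same value as the default) is dropped.
import Mathlib
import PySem

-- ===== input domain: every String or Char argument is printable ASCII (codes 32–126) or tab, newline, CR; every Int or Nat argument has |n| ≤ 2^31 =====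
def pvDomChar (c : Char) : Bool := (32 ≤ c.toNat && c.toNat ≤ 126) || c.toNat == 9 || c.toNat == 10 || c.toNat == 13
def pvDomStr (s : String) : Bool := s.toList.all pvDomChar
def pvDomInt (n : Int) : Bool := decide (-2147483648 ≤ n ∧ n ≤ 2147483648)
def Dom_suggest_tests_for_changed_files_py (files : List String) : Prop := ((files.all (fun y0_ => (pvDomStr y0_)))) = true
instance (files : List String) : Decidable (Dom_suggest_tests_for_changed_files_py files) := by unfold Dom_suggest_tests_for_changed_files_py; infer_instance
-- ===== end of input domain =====

-- B replaces A's three separate short-circuiting any-scans with one pass that accumulates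
-- has_py/has_js flags and drops the inert docker/yaml branch (same value as the default); objective: simpler.


-- ===== PORT A =====
def suggest_tests_for_changed_files_py (files : List String) : List String :=
  if files.any (fun file => PySem.Str.endswith file ".py") then
    ["python -m pytest"]
  else if files.any (fun file =>
      PySem.Str.endswith file ".ts" || PySem.Str.endswith file ".tsx" ||
      PySem.Str.endswith file ".js" || PySem.Str.endswith file ".jsx") then
    ["npm test"]
  else if files.any (fun file =>
      PySem.Str.isIn "dockerfile" (PySem.Str.lower file) ||
      PySem.Str.endswith file ".yml" || PySem.Str.endswith file ".yaml") then
    ["git diff --stat"]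
  else
    ["git diff --stat"]

-- ===== PORT B =====
-- one loop step: set has_py / has_js flags for one file
def pvAltStep (st : Bool × Bool) (f : String) : Bool × Bool :=
  if PySem.Str.endswith f ".py" then (true, st.2)
  else if PySem.Str.endswith f ".ts" || PySem.Str.endswith f ".tsx" ||
          PySem.Str.endswith f ".js" || PySem.Str.endswith f ".jsx" then (st.1, true)
  else st

def suggest_tests_for_changed_files_py_alt (files : List String) : List String :=
  let flags := files.foldl pvAltStep (false, false)
  if flags.1 then ["python -m pytest"]
  else if flags.2 then ["npm test"]
  else ["git diff --stat"]

-- ===== PRECONDITION & SPEC =====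
def Spec_suggest_tests_for_changed_files_py (files : List String) (out : List String) : Prop := out = suggest_tests_for_changed_files_py_alt files
instance (files : List String) (out : List String) : Decidable (Spec_suggest_tests_for_changed_files_py files out) := by unfold Spec_suggest_tests_for_changed_files_py; infer_instance

-- ===== CLAIM (what is proved, stated in full; the proofs are below) =====
def Claim_equal_suggest_tests_for_changed_files_py : Prop := ∀ (files : List String), Dom_suggest_tests_for_changed_files_py files → Spec_suggest_tests_for_changed_files_py files (suggest_tests_for_changed_files_py files)

-- ===== LEMMAS AND PROOFS =====
theorem pvAnyCongr {α : Type} (l : List α) (p q : α → Bool)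
    (h : ∀ x ∈ l, p x = q x) : l.any p = l.any q := by
  induction l with
  | nil => rfl
  | cons x xs ih =>
    simp only [List.any_cons, h x (List.mem_cons_self), 
      ih (fun y hy => h y (List.mem_cons_of_mem _ hy))]

theorem pvAltStep_fst (files : List String) (a b : Bool) :
    (files.foldl pvAltStep (a, b)).1
      = (a || files.any (fun f => PySem.Str.endswith f ".py")) := by
  induction files generalizing a b with
  | nil => simp
  | cons f fs ih =>
    simp only [List.foldl_cons, List.any_cons, pvAltStep]
    split_ifs with h1 h2
    · rw [ih, h1]
      simp only [Bool.true_or, Bool.or_true]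
    · simp only [Bool.not_eq_true] at h1
      rw [ih, h1]
      simp only [Bool.false_or]
    · simp only [Bool.not_eq_true] at h1
      rw [ih, h1]
      simp only [Bool.false_or]

theorem pvAltStep_snd (files : List String) (a b : Bool) :
    (files.foldl pvAltStep (a, b)).2
      = (b || files.any (fun f => !PySem.Str.endswith f ".py" &&
          (PySem.Str.endswith f ".ts" || PySem.Str.endswith f ".tsx" ||
           PySem.Str.endswith f ".js" || PySem.Str.endswith f ".jsx"))) := by
  induction files generalizing a b with
  | nil => simp
  | cons f fs ih =>
    simp only [List.foldl_cons, List.any_cons, pvAltStep]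
    split_ifs with h1 h2
    · rw [ih, h1]
      simp only [Bool.not_true, Bool.false_and, Bool.false_or]
    · simp only [Bool.not_eq_true] at h1
      rw [ih, h1, h2]
      simp only [Bool.not_false, Bool.true_and, Bool.true_or, Bool.or_true]
    · simp only [Bool.not_eq_true] at h1 h2
      rw [ih, h1, h2]
      simp only [Bool.not_false, Bool.and_false, Bool.false_or]

-- ===== VERDICT (by name: the statement is the Claim_ definition above) =====
theorem suggest_tests_for_changed_files_py_spec : Claim_equal_suggest_tests_for_changed_files_py := by
  intro files _
  unfold Spec_suggest_tests_for_changed_files_py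
  unfold suggest_tests_for_changed_files_py suggest_tests_for_changed_files_py_alt
  simp only [pvAltStep_fst, pvAltStep_snd, Bool.false_or]
  by_cases hpy : (files.any (fun f => PySem.Str.endswith f ".py")) = true
  · rw [if_pos hpy, if_pos hpy]
  · have hall : ∀ f ∈ files, PySem.Str.endswith f ".py" = false := by
      intro f hf
      by_contra hc
      exact hpy (List.any_eq_true.mpr ⟨f, hf, by simpa using hc⟩)
    have hcong :
        files.any (fun f => !PySem.Str.endswith f ".py" &&
            (PySem.Str.endswith f ".ts" || PySem.Str.endswith f ".tsx" ||
             PySem.Str.endswith f ".js" || PySem.Str.endswith f ".jsx"))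
          = files.any (fun f =>
             PySem.Str.endswith f ".ts" || PySem.Str.endswith f ".tsx" ||
             PySem.Str.endswith f ".js" || PySem.Str.endswith f ".jsx") := by
      refine pvAnyCongr _ _ _ fun f hf => ?_
      rw [hall f hf]
      simp only [Bool.not_false, Bool.true_and]
    rw [if_neg hpy, if_neg hpy, hcong]
    by_cases hjs : (files.any (fun f =>
        PySem.Str.endswith f ".ts" || PySem.Str.endswith f ".tsx" ||
        PySem.Str.endswith f ".js" || PySem.Str.endswith f ".jsx")) = true
    · rw [if_pos hjs, if_pos hjs]
    · rw [if_neg hjs, if_neg hjs, ite_self]
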